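-- pv_equiv track=rewrite | github.com/SergioLopezMaldonado21/MaratonHTML | Maraton pYTHON/app.py | inicializar_tablero
-- ===== SOURCE A (Python) =====
-- def inicializar_tablero(n, m):
--     # Inicializar el tablero con todas las casillas en negro ('N')
--     tablero = [['N' for _ in range(m)] for _ in range(n)]
--
--     for i in range(n):
--         # Invertir las filas pares para crear el efecto serpiente
--         if i % 2 == 0:
--             tablero[i] = tablero[i][::-1]
--     p = 0
--     # Aplicar las reglas específicas para cambiar elementos a blanco
--     for i in range(0,n):
--         for j in range(0,m):
--             if tablero[i ][j] == 'N':
--                 p = p + 1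
--             if p == 5 :
--                 tablero[i ][j] = 'O'
--                 p = 0
--             col =  i +1
--             if col % 2 == 0 and col % 4 != 0 :
--                 # Para filas divisibles por 2 pero no por 4, y no la última fila,
--                 # cambiar el último elemento de la SIGUIENTE fila a blanco
--                 if j < m-1:
--                     tablero[i ][j] = 'B'  # Corrección: Usar -1 para acceder al último elemento
--             elif col % 4 == 0:
--                 # Para filas divisibles por 4, excepto la primera fila,
--                 # cambiar el primer elemento de la fila actual a blanco
--                 if j > 0:
--                     tablero[i][j] = 'B'  # Corrección: Acceder al primer elemento correctamente
--
--
--     # Asegurar que la primera casilla sea blanca y la última casilla sea negra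
--     tablero[0][0] = 'B'  # Casilla de inicio como Blanca
--     if n % 2 == 0:
--         tablero[-1][0] = 'B'  # Para un número par de filas, la última casilla al inicio de la fila
--     else:
--         tablero[-1][-1] = 'B'  # Para un número impar de filas, la última casilla al final de la fila
--
--     return tablero
-- ===== SOURCE B (Python) =====
-- def inicializar_tablero(n, m):
--     # Closed-form per-cell rule: counter p always increments, so 'O' lands at
--     # linear index k with (k+1)%5==0; column-'B' rules override 'O'.
--     def cell(i, j):
--         col = i + 1
--         if col % 2 == 0 and col % 4 != 0 and j < m - 1:
--             return 'B'
--         if col % 4 == 0 and j > 0: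
--             return 'B'
--         if (i * m + j + 1) % 5 == 0:
--             return 'O'
--         return 'N'
--     tablero = [[cell(i, j) for j in range(m)] for i in range(n)]
--     tablero[0][0] = 'B'
--     if n % 2 == 0:
--         tablero[-1][0] = 'B'
--     else:
--         tablero[-1][-1] = 'B'
--     return tablero
-- ===== Notes on version B (the rewrite author's own statement) =====
-- stated objective: simpler
-- what changed: A's snake-reversal pass and stateful counter/overwrite loop are replaced by a single closed-form per-cell rule (the reversal is a no-op on an all-'N' grid and the counter just tracks the linear index mod 5), followed by the same two forced fixes.
import Mathlib
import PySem

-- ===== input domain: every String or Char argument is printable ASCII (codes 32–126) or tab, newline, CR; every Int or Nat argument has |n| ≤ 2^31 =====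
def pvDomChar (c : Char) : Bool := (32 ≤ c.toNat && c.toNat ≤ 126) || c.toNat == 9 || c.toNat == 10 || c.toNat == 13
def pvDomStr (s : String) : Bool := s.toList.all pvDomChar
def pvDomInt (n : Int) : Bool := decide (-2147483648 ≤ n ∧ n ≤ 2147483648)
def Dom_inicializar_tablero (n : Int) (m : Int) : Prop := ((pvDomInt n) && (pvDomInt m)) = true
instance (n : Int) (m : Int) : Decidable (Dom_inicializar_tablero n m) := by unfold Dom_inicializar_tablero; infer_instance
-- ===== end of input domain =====

-- B replaces A's reversal pass plus stateful counter loop by a single closed-form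
-- per-cell rule (simpler); equivalence is proved on n ≥ 1 ∧ m ≥ 1 (elsewhere A raises).

-- ===== PORT A =====
-- tablero[i][j] (indices known non-negative inside A's loops)
def pvGet2 (t : List (List String)) (i j : Nat) : String := (t.getD i []).getD j ""
-- tablero[i][j] = v
def pvSet2 (t : List (List String)) (i j : Nat) (v : String) : List (List String) :=
  t.modify i (fun r => r.set j v)

-- the body of A's inner `for j` loop, transcribed statement by statement
def pvStepA (m : Int) (i : Nat) (st : List (List String) × Int) (j : Nat) :
    List (List String) × Int :=
  let p := if pvGet2 st.1 i j == "N" then st.2 + 1 else st.2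
  let st1 := if p == (5 : Int) then (pvSet2 st.1 i j "O", (0 : Int)) else (st.1, p)
  let col : Int := (i : Int) + 1
  if col % 2 == 0 && col % 4 != 0 then
    (if (j : Int) < m - 1 then (pvSet2 st1.1 i j "B", st1.2) else st1)
  else if col % 4 == 0 then
    (if 0 < j then (pvSet2 st1.1 i j "B", st1.2) else st1)
  else st1

-- A's inner `for j in range(0, m)` loop
def pvRowA (m : Int) (st : List (List String) × Int) (i : Nat) : List (List String) × Int :=
  (List.range m.toNat).foldl (fun st j => pvStepA m i st j) st

def inicializar_tablero (n : Int) (m : Int) : List (List String) :=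
  let tablero := (List.range n.toNat).map (fun _ => (List.range m.toNat).map (fun _ => "N"))
  -- snake pass: tablero[i] = tablero[i][::-1] for even i ([::-1] = reverse, exact)
  let tablero := (List.range n.toNat).foldl
    (fun t i => if i % 2 == 0 then t.modify i (fun r => r.reverse) else t) tablero
  let st := (List.range n.toNat).foldl (pvRowA m) (tablero, (0 : Int))
  let tablero := pvSet2 st.1 0 0 "B"
  -- tablero[-1][0] / tablero[-1][-1]: last row, first/last element (exact for n ≥ 1, m ≥ 1)
  if n % 2 == 0 then pvSet2 tablero (tablero.length - 1) 0 "B"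
  else tablero.modify (tablero.length - 1) (fun r => r.set (r.length - 1) "B")

-- ===== PORT B =====
-- B's closed-form cell rule
def pvCell (m : Int) (i j : Nat) : String :=
  let col : Int := (i : Int) + 1
  if col % 2 == 0 && col % 4 != 0 && decide ((j : Int) < m - 1) then "B"
  else if col % 4 == 0 && decide (0 < j) then "B"
  else if ((i : Int) * m + (j : Int) + 1) % 5 == 0 then "O"
  else "N"

def inicializar_tablero_alt (n : Int) (m : Int) : List (List String) :=
  let tablero := (List.range n.toNat).map (fun i => (List.range m.toNat).map (fun j => pvCell m i j))
  let tablero := tablero.modify 0 (fun r => r.set 0 "B")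
  if n % 2 == 0 then tablero.modify (tablero.length - 1) (fun r => r.set 0 "B")
  else tablero.modify (tablero.length - 1) (fun r => r.set (r.length - 1) "B")

-- ===== PRECONDITION & SPEC =====
-- Pre_ excludes exactly n < 1 or m < 1, where A raises IndexError at tablero[0][0].
def Pre_inicializar_tablero (n : Int) (m : Int) : Prop := 1 ≤ n ∧ 1 ≤ m
instance (n : Int) (m : Int) : Decidable (Pre_inicializar_tablero n m) := by
  unfold Pre_inicializar_tablero; infer_instance
def pvWitness_inicializar_tablero : Int × Int := (3, 4)

def Spec_inicializar_tablero (n : Int) (m : Int) (out : List (List String)) : Prop := out = inicializar_tablero_alt n m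
instance (n : Int) (m : Int) (out : List (List String)) : Decidable (Spec_inicializar_tablero n m out) := by unfold Spec_inicializar_tablero; infer_instance

-- ===== CLAIM (what is proved, stated in full; the proofs are below) =====
def Claim_equal_inicializar_tablero : Prop := ∀ (n : Int) (m : Int), Dom_inicializar_tablero n m → Pre_inicializar_tablero n m → Spec_inicializar_tablero n m (inicializar_tablero n m)

-- ===== LEMMAS AND PROOFS =====

-- the N×M grid whose cell (i,j) is f i j
def pvBuild (N M : Nat) (f : Nat → Nat → String) : List (List String) :=
  (List.range N).map (fun i => (List.range M).map (fun j => f i j))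

-- A's grid after the first c cells (row-major) of the main loop have been processed
def pvPartF (m : Int) (M c : Nat) (i j : Nat) : String :=
  if i * M + j < c then pvCell m i j else "N"

theorem pvBuild_ext {N M : Nat} {f g : Nat → Nat → String}
    (h : ∀ i, i < N → ∀ j, j < M → f i j = g i j) : pvBuild N M f = pvBuild N M g := by
  unfold pvBuild
  refine List.map_congr_left (fun i hi => ?_)
  refine List.map_congr_left (fun j hj => ?_)
  exact h i (List.mem_range.mp hi) j (List.mem_range.mp hj)

theorem pvGet2_build {N M : Nat} {f : Nat → Nat → String} {i j : Nat}
    (hi : i < N) (hj : j < M) : pvGet2 (pvBuild N M f) i j = f i j := by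
  unfold pvGet2 pvBuild
  have hlen : i < ((List.range N).map (fun i => (List.range M).map (fun j => f i j))).length := by
    simpa using hi
  rw [List.getD_eq_getElem _ [] hlen, List.getElem_map, List.getElem_range]
  have hlen2 : j < ((List.range M).map (fun j => f i j)).length := by simpa using hj
  rw [List.getD_eq_getElem _ "" hlen2, List.getElem_map, List.getElem_range]

theorem pvSet2_build {N M : Nat} {f : Nat → Nat → String} {i j : Nat} {v : String}
    (hi : i < N) (hj : j < M) :
    pvSet2 (pvBuild N M f) i j v
      = pvBuild N M (fun i' j' => if i' = i ∧ j' = j then v else f i' j') := by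
  unfold pvSet2 pvBuild
  refine List.ext_getElem (by simp) ?_
  intro i' h1 h2
  rw [List.getElem_modify]
  simp only [List.getElem_map, List.getElem_range]
  by_cases hii : i = i'
  · subst hii
    rw [if_pos rfl]
    refine List.ext_getElem (by simp) ?_
    intro j' h3 h4
    rw [List.getElem_set]
    simp only [List.getElem_map, List.getElem_range]
    by_cases hjj : j = j'
    · subst hjj; simp
    · have hjj' : ¬ j' = j := fun h => hjj h.symm
      simp [hjj, hjj']
  · rw [if_neg hii]
    refine List.map_congr_left (fun j' _ => ?_)
    have hne : ¬ (i' = i ∧ j' = j) := fun h => hii h.1.symm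
    rw [if_neg hne]

theorem pvIdx_inj {M i j i' j' : Nat} (hj : j < M) (hj' : j' < M)
    (h : i * M + j = i' * M + j') : i = i' ∧ j = j' := by
  have hM : 0 < M := by omega
  have h1 : (i * M + j) / M = i := by
    rw [Nat.mul_comm i M, Nat.mul_add_div hM, Nat.div_eq_of_lt hj]
    omega
  have h2 : (i' * M + j') / M = i' := by
    rw [Nat.mul_comm i' M, Nat.mul_add_div hM, Nat.div_eq_of_lt hj']
    omega
  have hii : i = i' := by rw [← h1, ← h2, h]
  refine ⟨hii, ?_⟩
  subst hii; omega

theorem pvIf_shift {s : String} {k c : Nat} (hk : k ≠ c) :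
    (if k < c + 1 then s else "N") = (if k < c then s else "N") := by
  rcases Nat.lt_or_ge k c with h | h
  · rw [if_pos (Nat.lt_succ_of_lt h), if_pos h]
  · have h1 : ¬ k < c := Nat.not_lt.mpr h
    have h2 : ¬ k < c + 1 := Nat.not_lt.mpr (by omega)
    rw [if_neg h2, if_neg h1]

theorem pvPart_set {m : Int} {M N i j : Nat} (hi : i < N) (hj : j < M) :
    pvSet2 (pvBuild N M (pvPartF m M (i * M + j))) i j (pvCell m i j)
      = pvBuild N M (pvPartF m M (i * M + j + 1)) := by
  rw [pvSet2_build hi hj]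
  refine pvBuild_ext (fun i' hi' j' hj' => ?_)
  by_cases h : i' = i ∧ j' = j
  · rw [if_pos h, h.1, h.2]
    unfold pvPartF
    rw [if_pos (show i * M + j < i * M + j + 1 from Nat.lt_succ_self _)]
  · rw [if_neg h]
    have hk : i' * M + j' ≠ i * M + j := fun he => h (pvIdx_inj hj' hj he)
    unfold pvPartF
    exact (pvIf_shift hk).symm

theorem pvPart_id {m : Int} {M N i j : Nat} (hi : i < N) (hj : j < M)
    (h : pvCell m i j = "N") :
    pvBuild N M (pvPartF m M (i * M + j)) = pvBuild N M (pvPartF m M (i * M + j + 1)) := by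
  refine pvBuild_ext (fun i' hi' j' hj' => ?_)
  by_cases hij : i' = i ∧ j' = j
  · rw [hij.1, hij.2]
    unfold pvPartF
    rw [if_neg (show ¬ i * M + j < i * M + j from Nat.lt_irrefl _),
        if_pos (show i * M + j < i * M + j + 1 from Nat.lt_succ_self _)]
    exact h.symm
  · have hk : i' * M + j' ≠ i * M + j := fun he => hij (pvIdx_inj hj' hj he)
    unfold pvPartF
    exact (pvIf_shift hk).symm

theorem pvSet2_twice {N M : Nat} {f : Nat → Nat → String} {i j : Nat} {a b : String}
    (hi : i < N) (hj : j < M) :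
    pvSet2 (pvSet2 (pvBuild N M f) i j a) i j b = pvSet2 (pvBuild N M f) i j b := by
  rw [pvSet2_build hi hj, pvSet2_build hi hj, pvSet2_build hi hj]
  refine pvBuild_ext (fun i' hi' j' hj' => ?_)
  by_cases h : i' = i ∧ j' = j
  · rw [if_pos h, if_pos h]
  · rw [if_neg h, if_neg h, if_neg h]

theorem pvStepA_part {m : Int} {M N i j : Nat} (hM : (M : Int) = m)
    (hi : i < N) (hj : j < M) :
    pvStepA m i (pvBuild N M (pvPartF m M (i * M + j)), ((i * M + j : Nat) : Int) % 5) j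
      = (pvBuild N M (pvPartF m M (i * M + j + 1)), ((i * M + j + 1 : Nat) : Int) % 5) := by
  have hC1 : ((i * M + j + 1 : Nat) : Int) = ((i * M + j : Nat) : Int) + 1 := by push_cast; ring
  have hCnn : (0 : Int) ≤ ((i * M + j : Nat) : Int) := Int.natCast_nonneg _
  have hC : (i : Int) * m + (j : Int) = ((i * M + j : Nat) : Int) := by
    rw [← hM]; push_cast; ring
  have hget : pvGet2 (pvBuild N M (pvPartF m M (i * M + j))) i j = "N" := by
    rw [pvGet2_build hi hj]
    unfold pvPartF
    rw [if_neg (Nat.lt_irrefl _)]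
  have hOiff : (((i : Int) * m + (j : Int) + 1) % 5 = 0)
      ↔ (((i * M + j : Nat) : Int) % 5 + 1 = 5) := by
    rw [hC]; omega
  unfold pvStepA
  simp only [hget, Bool.and_eq_true, beq_iff_eq, bne_iff_ne, if_true]
  rw [hC1]
  by_cases hC2 : ((i : Int) + 1) % 2 = 0 ∧ ((i : Int) + 1) % 4 ≠ 0
  · rw [if_pos hC2]
    by_cases hjlt : (j : Int) < m - 1
    · have hcell : pvCell m i j = "B" := by
        simp only [pvCell, Bool.and_eq_true, beq_iff_eq, bne_iff_ne, decide_eq_true_eq]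
        split_ifs with g1 g2 g3
        · rfl
        · exact absurd ⟨hC2, hjlt⟩ g1
        · exact absurd ⟨hC2, hjlt⟩ g1
        · exact absurd ⟨hC2, hjlt⟩ g1
      rw [if_pos hjlt]
      by_cases hO : ((i * M + j : Nat) : Int) % 5 + 1 = 5
      · rw [if_pos hO]
        dsimp only
        refine congrArg₂ Prod.mk ?_ ?_
        · rw [pvSet2_twice hi hj, ← hcell]
          exact pvPart_set hi hj
        · omega
      · rw [if_neg hO]
        dsimp only
        refine congrArg₂ Prod.mk ?_ ?_
        · rw [← hcell]
          exact pvPart_set hi hj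
        · omega
    · rw [if_neg hjlt]
      by_cases hO : ((i * M + j : Nat) : Int) % 5 + 1 = 5
      · have hcell : pvCell m i j = "O" := by
          simp only [pvCell, Bool.and_eq_true, beq_iff_eq, bne_iff_ne, decide_eq_true_eq]
          split_ifs with g1 g2 g3
          · exact absurd g1.2 hjlt
          · exact absurd g2.1 hC2.2
          · rfl
          · exact absurd (hOiff.mpr hO) g3
        rw [if_pos hO]
        refine congrArg₂ Prod.mk ?_ ?_
        · rw [← hcell]
          exact pvPart_set hi hj
        · omega
      · have hcell : pvCell m i j = "N" := by
          simp only [pvCell, Bool.and_eq_true, beq_iff_eq, bne_iff_ne, decide_eq_true_eq]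
          split_ifs with g1 g2 g3
          · exact absurd g1.2 hjlt
          · exact absurd g2.1 hC2.2
          · exact absurd (hOiff.mp g3) hO
          · rfl
        rw [if_neg hO]
        refine congrArg₂ Prod.mk ?_ ?_
        · exact pvPart_id hi hj hcell
        · omega
  · rw [if_neg hC2]
    by_cases hC4 : ((i : Int) + 1) % 4 = 0
    · rw [if_pos hC4]
      by_cases hjp : 0 < j
      · have hcell : pvCell m i j = "B" := by
          simp only [pvCell, Bool.and_eq_true, beq_iff_eq, bne_iff_ne, decide_eq_true_eq]
          split_ifs with g1 g2 g3
          · exact absurd g1.1 hC2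
          · rfl
          · exact absurd ⟨hC4, hjp⟩ g2
          · exact absurd ⟨hC4, hjp⟩ g2
        rw [if_pos hjp]
        by_cases hO : ((i * M + j : Nat) : Int) % 5 + 1 = 5
        · rw [if_pos hO]
          dsimp only
          refine congrArg₂ Prod.mk ?_ ?_
          · rw [pvSet2_twice hi hj, ← hcell]
            exact pvPart_set hi hj
          · omega
        · rw [if_neg hO]
          dsimp only
          refine congrArg₂ Prod.mk ?_ ?_
          · rw [← hcell]
            exact pvPart_set hi hj
          · omega
      · rw [if_neg hjp]
        by_cases hO : ((i * M + j : Nat) : Int) % 5 + 1 = 5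
        · have hcell : pvCell m i j = "O" := by
            simp only [pvCell, Bool.and_eq_true, beq_iff_eq, bne_iff_ne, decide_eq_true_eq]
            split_ifs with g1 g2 g3
            · exact absurd g1.1 hC2
            · exact absurd g2.2 hjp
            · rfl
            · exact absurd (hOiff.mpr hO) g3
          rw [if_pos hO]
          refine congrArg₂ Prod.mk ?_ ?_
          · rw [← hcell]
            exact pvPart_set hi hj
          · omega
        · have hcell : pvCell m i j = "N" := by
            simp only [pvCell, Bool.and_eq_true, beq_iff_eq, bne_iff_ne, decide_eq_true_eq]
            split_ifs with g1 g2 g3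
            · exact absurd g1.1 hC2
            · exact absurd g2.2 hjp
            · exact absurd (hOiff.mp g3) hO
            · rfl
          rw [if_neg hO]
          refine congrArg₂ Prod.mk ?_ ?_
          · exact pvPart_id hi hj hcell
          · omega
    · rw [if_neg hC4]
      by_cases hO : ((i * M + j : Nat) : Int) % 5 + 1 = 5
      · have hcell : pvCell m i j = "O" := by
          simp only [pvCell, Bool.and_eq_true, beq_iff_eq, bne_iff_ne, decide_eq_true_eq]
          split_ifs with g1 g2 g3
          · exact absurd g1.1 hC2
          · exact absurd g2.1 hC4
          · rfl
          · exact absurd (hOiff.mpr hO) g3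
        rw [if_pos hO]
        refine congrArg₂ Prod.mk ?_ ?_
        · rw [← hcell]
          exact pvPart_set hi hj
        · omega
      · have hcell : pvCell m i j = "N" := by
          simp only [pvCell, Bool.and_eq_true, beq_iff_eq, bne_iff_ne, decide_eq_true_eq]
          split_ifs with g1 g2 g3
          · exact absurd g1.1 hC2
          · exact absurd g2.1 hC4
          · exact absurd (hOiff.mp g3) hO
          · rfl
        rw [if_neg hO]
        refine congrArg₂ Prod.mk ?_ ?_
        · exact pvPart_id hi hj hcell
        · omega

theorem pvRowA_part {m : Int} {M N i : Nat} (hM : (M : Int) = m) (hMt : m.toNat = M)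
    (hi : i < N) :
    pvRowA m (pvBuild N M (pvPartF m M (i * M)), ((i * M : Nat) : Int) % 5) i
      = (pvBuild N M (pvPartF m M (i * M + M)), ((i * M + M : Nat) : Int) % 5) := by
  have aux : ∀ j, j ≤ M →
      (List.range j).foldl (fun st j => pvStepA m i st j)
        (pvBuild N M (pvPartF m M (i * M)), ((i * M : Nat) : Int) % 5)
      = (pvBuild N M (pvPartF m M (i * M + j)), ((i * M + j : Nat) : Int) % 5) := by
    intro j hjM
    induction j with
    | zero => simp
    | succ j ih =>
      rw [List.range_succ, List.foldl_append, ih (by omega)]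
      simpa using pvStepA_part hM hi (show j < M by omega)
  unfold pvRowA
  rw [hMt]
  exact aux M le_rfl

theorem pvMainA {m : Int} {M N : Nat} (hM : (M : Int) = m) (hMt : m.toNat = M) :
    (List.range N).foldl (pvRowA m) (pvBuild N M (pvPartF m M 0), (0 : Int))
      = (pvBuild N M (pvPartF m M (N * M)), ((N * M : Nat) : Int) % 5) := by
  have aux : ∀ i, i ≤ N →
      (List.range i).foldl (pvRowA m) (pvBuild N M (pvPartF m M 0), (0 : Int))
        = (pvBuild N M (pvPartF m M (i * M)), ((i * M : Nat) : Int) % 5) := by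
    intro i hiN
    induction i with
    | zero => simp
    | succ i ih =>
      rw [List.range_succ, List.foldl_append, ih (by omega)]
      simp only [List.foldl_cons, List.foldl_nil]
      rw [pvRowA_part hM hMt (show i < N by omega)]
      have he : i * M + M = (i + 1) * M := by ring
      rw [he]
  exact aux N le_rfl

theorem pvStart_eq {m : Int} {N M : Nat} :
    (List.range N).map (fun _ => (List.range M).map (fun _ => "N"))
      = pvBuild N M (pvPartF m M 0) := by
  unfold pvBuild pvPartF
  refine List.map_congr_left (fun i _ => ?_)
  refine List.map_congr_left (fun j _ => ?_)
  simp

theorem pvRev_noop {N M : Nat} :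
    (List.range N).foldl
      (fun t i => if i % 2 == 0 then t.modify i (fun r => r.reverse) else t)
      ((List.range N).map (fun _ => (List.range M).map (fun _ => "N")))
    = (List.range N).map (fun _ => (List.range M).map (fun _ => "N")) := by
  have hrow : ((List.range M).map (fun _ => ("N" : String))).reverse
      = (List.range M).map (fun _ => ("N" : String)) := by
    rw [List.map_const', List.reverse_replicate]
  have hmod : ∀ i, ((List.range N).map
        (fun _ => (List.range M).map (fun _ => ("N" : String)))).modify i (fun r => r.reverse)
      = (List.range N).map (fun _ => (List.range M).map (fun _ => ("N" : String))) := by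
    intro i
    refine List.ext_getElem (by simp) ?_
    intro i' h1 h2
    rw [List.getElem_modify]
    simp only [List.getElem_map]
    split
    · exact hrow
    · rfl
  have hstep : ∀ (l : List Nat),
      l.foldl (fun t i => if i % 2 == 0 then t.modify i (fun r => r.reverse) else t)
        ((List.range N).map (fun _ => (List.range M).map (fun _ => "N")))
      = (List.range N).map (fun _ => (List.range M).map (fun _ => "N")) := by
    intro l
    induction l with
    | nil => rfl
    | cons a l ih =>
      simp only [List.foldl_cons]
      split
      · rw [hmod]; exact ih
      · exact ih
  exact hstep _

theorem pvFinal_grid {m : Int} {N M : Nat} :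
    pvBuild N M (pvPartF m M (N * M)) = pvBuild N M (fun i j => pvCell m i j) := by
  refine pvBuild_ext (fun i hi j hj => ?_)
  unfold pvPartF
  have hlt : i * M + j < N * M := by
    calc i * M + j < i * M + M := by omega
    _ = (i + 1) * M := by ring
    _ ≤ N * M := Nat.mul_le_mul_right M (by omega)
  rw [if_pos hlt]

-- ===== VERDICT (by name: the statement is the Claim_ definition above) =====
theorem inicializar_tablero_spec : Claim_equal_inicializar_tablero := by
  intro n m _ hpre
  obtain ⟨hn, hm⟩ := hpre
  unfold Spec_inicializar_tablero inicializar_tablero inicializar_tablero_alt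
  have hM : ((m.toNat : Nat) : Int) = m := Int.toNat_of_nonneg (by omega)
  simp only []
  rw [pvRev_noop, pvStart_eq (m := m), pvMainA hM rfl, pvFinal_grid]
  simp only [pvSet2, pvBuild]
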